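-- pv_equiv track=rewrite | github.com/ioaksenenko/neural_networks | utilities/datamaker/main.py | number_input_question_generate
-- ===== SOURCE A (Python) =====
-- def number_input_question_generate(n=1, is_item=True):
--     inputs = []
--     outputs = []
--     for i in range(n):
--         input = ['<p>', '_', '</p>']
--         output = ['niq_0', 'niq_1', 'niq_0']
--         for j in range(i + 1):
--             input += ['<p>', '{#_}', '</p>']
--             output += ['niq_0', 'niq_' + str(j + 2), 'niq_0']
--         input += ['<p>', '_', '</p>']
--         output += ['niq_0', 'niq_1', 'niq_0']
--         inputs.append(input)
--         outputs.append(output)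
--     return inputs, outputs
-- ===== SOURCE B (Python) =====
-- def number_input_question_generate(n=1, is_item=True):
--     inputs = []
--     outputs = []
--     cur_in = ['<p>', '_', '</p>']
--     cur_out = ['niq_0', 'niq_1', 'niq_0']
--     for i in range(n):
--         cur_in = cur_in + ['<p>', '{#_}', '</p>']
--         cur_out = cur_out + ['niq_0', 'niq_' + str(i + 2), 'niq_0']
--         inputs.append(cur_in + ['<p>', '_', '</p>'])
--         outputs.append(cur_out + ['niq_0', 'niq_1', 'niq_0'])
--     return inputs, outputs
-- ===== Notes on version B (the rewrite author's own statement) =====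
-- stated objective: simpler
-- what changed: Replaced the nested loop (rebuilding each row's growing middle from scratch) by two running accumulators extended by one block per iteration, so each row is the accumulator plus a constant tail.
import Mathlib
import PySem

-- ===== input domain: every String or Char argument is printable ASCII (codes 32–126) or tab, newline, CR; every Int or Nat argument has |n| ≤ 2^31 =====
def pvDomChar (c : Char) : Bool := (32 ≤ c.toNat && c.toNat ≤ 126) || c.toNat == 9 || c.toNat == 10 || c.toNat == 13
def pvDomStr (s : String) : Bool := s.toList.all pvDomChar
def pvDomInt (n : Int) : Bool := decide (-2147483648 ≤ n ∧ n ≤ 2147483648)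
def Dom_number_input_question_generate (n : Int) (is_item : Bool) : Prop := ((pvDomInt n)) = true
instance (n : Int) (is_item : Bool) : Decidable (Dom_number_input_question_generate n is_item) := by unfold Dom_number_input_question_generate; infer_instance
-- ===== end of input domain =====

-- ===== PORT A =====
-- B replaces A's nested loop by two running accumulators (one block appended per iteration); proved equal on all inputs.

-- A's inner-loop body (the j-loop step): extend the row by one middle block.
def pvInnerStep (p : List String × List String) (j : Int) : List String × List String :=
  (p.1 ++ ["<p>", "{#_}", "</p>"], p.2 ++ ["niq_0", "niq_" ++ PySem.Int.toStr (j + 2), "niq_0"])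

-- A's outer-loop body: build row i from scratch (head, inner loop over range(i+1), tail), append it.
def pvOuterStepA (acc : List (List String) × List (List String)) (i : Int) :
    List (List String) × List (List String) :=
  let inner := (PySem.List.pyRange 0 (i + 1) 1).foldl pvInnerStep
    (["<p>", "_", "</p>"], ["niq_0", "niq_1", "niq_0"])
  (acc.1 ++ [inner.1 ++ ["<p>", "_", "</p>"]],
   acc.2 ++ [inner.2 ++ ["niq_0", "niq_1", "niq_0"]])

def number_input_question_generate (n : Int) (is_item : Bool) :
    List (List String) × List (List String) :=
  (PySem.List.pyRange 0 n 1).foldl pvOuterStepA ([], [])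

-- ===== PORT B =====
-- B's loop body: extend the running accumulators by one block, append accumulator + tail as the new row.
def pvOuterStepB
    (s : (List String × List String) × (List (List String) × List (List String))) (i : Int) :
    (List String × List String) × (List (List String) × List (List String)) :=
  let cin := s.1.1 ++ ["<p>", "{#_}", "</p>"]
  let cout := s.1.2 ++ ["niq_0", "niq_" ++ PySem.Int.toStr (i + 2), "niq_0"]
  ((cin, cout),
   (s.2.1 ++ [cin ++ ["<p>", "_", "</p>"]],
    s.2.2 ++ [cout ++ ["niq_0", "niq_1", "niq_0"]]))

def number_input_question_generate_alt (n : Int) (is_item : Bool) :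
    List (List String) × List (List String) :=
  ((PySem.List.pyRange 0 n 1).foldl pvOuterStepB
    ((["<p>", "_", "</p>"], ["niq_0", "niq_1", "niq_0"]), ([], []))).2
-- ===== PRECONDITION & SPEC =====
def Spec_number_input_question_generate (n : Int) (is_item : Bool) (out : List (List String) × List (List String)) : Prop := out = number_input_question_generate_alt n is_item
instance (n : Int) (is_item : Bool) (out : List (List String) × List (List String)) : Decidable (Spec_number_input_question_generate n is_item out) := by unfold Spec_number_input_question_generate; infer_instance

-- ===== CLAIM (what is proved, stated in full; the proofs are below) =====
def Claim_equal_number_input_question_generate : Prop := ∀ (n : Int) (is_item : Bool), Dom_number_input_question_generate n is_item → Spec_number_input_question_generate n is_item (number_input_question_generate n is_item)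

-- ===== LEMMAS AND PROOFS =====

-- ===== VERDICT (by name: the statement is the Claim_ definition above) =====
-- A's inner fold over range(0, m) (the row built from scratch) = B's running accumulator after m steps.
def pvCur (m : Nat) : List String × List String :=
  (PySem.List.pyRange 0 (m : Int) 1).foldl pvInnerStep
    (["<p>", "_", "</p>"], ["niq_0", "niq_1", "niq_0"])

theorem pvCur_succ (m : Nat) :
    pvCur (m + 1) = pvInnerStep (pvCur m) (m : Int) := by
  unfold pvCur
  rw [show ((m + 1 : Nat) : Int) = (m : Int) + 1 by push_cast; ring,
      PySem.List.pyRange_one_succ_right (by positivity), List.foldl_append]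
  rfl

theorem pvMain (m : Nat) :
    (PySem.List.pyRange 0 (m : Int) 1).foldl pvOuterStepB
      ((["<p>", "_", "</p>"], ["niq_0", "niq_1", "niq_0"]), ([], []))
    = (pvCur m, (PySem.List.pyRange 0 (m : Int) 1).foldl pvOuterStepA ([], [])) := by
  induction m with
  | zero => rfl
  | succ m ih =>
      rw [show ((m + 1 : Nat) : Int) = (m : Int) + 1 by push_cast; ring,
          PySem.List.pyRange_one_succ_right (by positivity), List.foldl_append,
          List.foldl_append, ih]
      simp only [List.foldl_cons, List.foldl_nil, pvOuterStepB, pvOuterStepA]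
      rw [show ((m : Int) + 1) = ((m + 1 : Nat) : Int) by push_cast; ring]
      have h2 : List.foldl pvInnerStep (["<p>", "_", "</p>"], ["niq_0", "niq_1", "niq_0"])
          (PySem.List.pyRange 0 ((m + 1 : Nat) : Int) 1) = pvInnerStep (pvCur m) (m : Int) :=
        pvCur_succ m
      rw [h2, pvCur_succ]
      rfl

theorem number_input_question_generate_spec : Claim_equal_number_input_question_generate := by
  intro n is_item _
  unfold Spec_number_input_question_generate number_input_question_generate
    number_input_question_generate_alt
  by_cases h : n ≤ 0
  · rw [PySem.List.pyRange_one_eq_nil h]; rfl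
  · have hn : n = ((n.toNat : Nat) : Int) := by omega
    rw [hn, pvMain]
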